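-- pv_equiv track=rewrite | github.com/AndrewAlgol/WrittenBy | Task.py | FindAndChange
-- ===== SOURCE A (Python) =====
-- def FindAndChange(Matrix):
--     Min = Matrix[0][0]
--     l = 0
--     m = 0
--     for i in range(len(Matrix)):
--         for j in range(len(Matrix)):
--             if Min > Matrix[i][j]:
--                 Min = Matrix[i][j]
--                 l, m = i, j
--     Matrix[l][m] *= 10
--     return Matrix
-- ===== SOURCE B (Python) =====
-- def FindAndChange(Matrix):
--     n = len(Matrix)
--     row_mins = [min(Matrix[i][j] for j in range(n)) for i in range(n)]
--     best = min(row_mins)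
--     l = row_mins.index(best)
--     m = [Matrix[l][j] for j in range(n)].index(best)
--     Matrix[l][m] *= 10
--     return Matrix
-- ===== Notes on version B (the rewrite author's own statement) =====
-- stated objective: alternative
-- what changed: Replaces the single row-major scan that tracks (min, l, m) with a reduce-then-locate decomposition: a per-row minimum table, then two first-index lookups (row of the global minimum, column inside that row).
import Mathlib
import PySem

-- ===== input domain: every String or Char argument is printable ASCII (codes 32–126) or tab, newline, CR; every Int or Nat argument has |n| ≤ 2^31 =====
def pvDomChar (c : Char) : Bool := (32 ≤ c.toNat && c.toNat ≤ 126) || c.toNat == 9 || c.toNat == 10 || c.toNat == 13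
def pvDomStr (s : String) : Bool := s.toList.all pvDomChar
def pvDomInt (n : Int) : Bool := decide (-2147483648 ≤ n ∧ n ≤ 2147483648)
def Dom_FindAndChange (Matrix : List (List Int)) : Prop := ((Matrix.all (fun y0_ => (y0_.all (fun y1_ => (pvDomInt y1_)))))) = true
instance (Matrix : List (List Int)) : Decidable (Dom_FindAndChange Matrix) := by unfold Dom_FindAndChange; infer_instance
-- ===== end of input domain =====

-- B replaces A's single row-major scan tracking (min, l, m) by a per-row minimum table plus two
-- first-index lookups; both mutate Matrix in place in Python, the equivalence proved is about the
-- returned (= mutated) value.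


-- ===== PORT A =====
def FindAndChange (Matrix : List (List Int)) : List (List Int) :=
  let Min0 : Int := PySem.List.pyGetD (PySem.List.pyGetD Matrix 0 []) 0 0
  let n : Int := PySem.List.len Matrix
  let st :=
    (PySem.List.pyRange 0 n 1).foldl (fun st i =>
      (PySem.List.pyRange 0 n 1).foldl (fun st j =>
        if st.1 > PySem.List.pyGetD (PySem.List.pyGetD Matrix i []) j 0 then
          (PySem.List.pyGetD (PySem.List.pyGetD Matrix i []) j 0, i, j)
        else st) st) (Min0, (0 : Int), (0 : Int))
  PySem.List.pySetD Matrix st.2.1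
    (PySem.List.pySetD (PySem.List.pyGetD Matrix st.2.1 []) st.2.2
      (PySem.List.pyGetD (PySem.List.pyGetD Matrix st.2.1 []) st.2.2 0 * 10))

-- ===== PORT B =====
def FindAndChange_alt (Matrix : List (List Int)) : List (List Int) :=
  let n : Int := PySem.List.len Matrix
  let rowMins : List Int := (PySem.List.pyRange 0 n 1).map (fun i =>
    (PySem.List.min? ((PySem.List.pyRange 0 n 1).map (fun j =>
        PySem.List.pyGetD (PySem.List.pyGetD Matrix i []) j 0)) (fun x => x)).getD 0)
  let best : Int := (PySem.List.min? rowMins (fun x => x)).getD 0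
  let l : Int := ((PySem.List.index? rowMins best).getD 0 : Nat)
  let m : Int := ((PySem.List.index? ((PySem.List.pyRange 0 n 1).map (fun j =>
        PySem.List.pyGetD (PySem.List.pyGetD Matrix l []) j 0)) best).getD 0 : Nat)
  PySem.List.pySetD Matrix l
    (PySem.List.pySetD (PySem.List.pyGetD Matrix l []) m
      (PySem.List.pyGetD (PySem.List.pyGetD Matrix l []) m 0 * 10))

-- ===== PRECONDITION & SPEC =====
-- A indexes Matrix[i][j] for all i, j < len(Matrix) (and Matrix[0][0] first): it raises IndexError
-- unless the matrix is nonempty and every row has at least len(Matrix) entries; B raises there too.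
def Pre_FindAndChange (Matrix : List (List Int)) : Prop :=
  Matrix ≠ [] ∧ ∀ r ∈ Matrix, Matrix.length ≤ r.length
instance (Matrix : List (List Int)) : Decidable (Pre_FindAndChange Matrix) := by
  unfold Pre_FindAndChange; infer_instance
def pvWitness_FindAndChange : List (List Int) := [[3, 1], [2, 4]]

def Spec_FindAndChange (Matrix : List (List Int)) (out : List (List Int)) : Prop := out = FindAndChange_alt Matrix
instance (Matrix : List (List Int)) (out : List (List Int)) : Decidable (Spec_FindAndChange Matrix out) := by unfold Spec_FindAndChange; infer_instance

-- ===== CLAIM (what is proved, stated in full; the proofs are below) =====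
def Claim_equal_FindAndChange : Prop := ∀ (Matrix : List (List Int)), Dom_FindAndChange Matrix → Pre_FindAndChange Matrix → Spec_FindAndChange Matrix (FindAndChange Matrix)

-- ===== LEMMAS AND PROOFS =====

/-- Minimum of a nonempty list `x :: t` the way both Pythons compute it. -/
def rminL : List Int → Int
  | [] => 0
  | x :: t => t.foldl min x

/-- Index of the first occurrence of the minimum in a nonempty list. -/
def rposL : List Int → Nat
  | [] => 0
  | [_] => 0
  | x :: y :: t => if x ≤ rminL (y :: t) then 0 else rposL (y :: t) + 1

lemma foldl_min_pull (s : List Int) : ∀ (a b : Int), s.foldl min (min a b) = min a (s.foldl min b) := by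
  induction s with
  | nil => intro a b; rfl
  | cons c s ih =>
      intro a b
      simp only [List.foldl_cons]
      rw [min_assoc, ih a (min b c)]

lemma rminL_cons (x : Int) (y : Int) (t : List Int) :
    rminL (x :: y :: t) = min x (rminL (y :: t)) := by
  simp only [rminL, List.foldl_cons]
  exact foldl_min_pull t x y

lemma rminL_le_head (x : Int) (t : List Int) : rminL (x :: t) ≤ x := by
  simp only [rminL]
  exact (PySem.List.foldl_min_le t x).1

lemma rposL_lt_length (l : List Int) (h : l ≠ []) : rposL l < l.length := by
  induction l with
  | nil => exact absurd rfl h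
  | cons x t ih =>
      cases t with
      | nil => simp [rposL]
      | cons y s =>
          simp only [rposL]
          split
          · simp
          · have := ih (by simp)
            simpa using Nat.succ_lt_succ this

lemma idx_rmin : ∀ (t : List Int) (x : Int),
    PySem.List.index? (x :: t) (rminL (x :: t)) = some (rposL (x :: t)) := by
  intro t
  induction t with
  | nil =>
      intro x
      simp [rminL, rposL, List.idxOf?_cons]
  | cons y s ih =>
      intro x
      rw [rminL_cons]
      by_cases hx : x ≤ rminL (y :: s)
      · rw [min_eq_left hx]
        simp [rposL, hx, List.idxOf?_cons]
      · have hlt : rminL (y :: s) < x := lt_of_not_ge hx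
        rw [min_eq_right hlt.le,
            PySem.List.index?_cons_of_ne _ (ne_of_gt hlt), ih]
        simp [rposL, hx]

/-- The element at the first-min position is the minimum. -/
lemma getD_rposL (l : List Int) (h : l ≠ []) : l.getD (rposL l) 0 = rminL l := by
  obtain ⟨x, t, rfl⟩ := List.exists_cons_of_ne_nil h
  obtain ⟨hk, hv, -⟩ := PySem.List.getElem_of_index?_eq_some (idx_rmin t x)
  rw [List.getD_eq_getElem _ _ hk, hv]

lemma inner_spec : ∀ (t : List Int) (x : Int) (k : Int) (st : Int × Int × Int) (i : Int),
    (PySem.List.enumerate (x :: t) k).foldl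
      (fun st p => if st.1 > p.2 then (p.2, i, p.1) else st) st
    = if rminL (x :: t) < st.1 then (rminL (x :: t), i, k + (rposL (x :: t) : Int)) else st := by
  intro t
  induction t with
  | nil =>
      intro x k st i
      simp only [PySem.List.enumerate_cons, PySem.List.enumerate_nil, List.foldl_cons,
        List.foldl_nil, rminL, rposL, gt_iff_lt, Nat.cast_zero, add_zero]
  | cons y s ih =>
      intro x k st i
      rw [PySem.List.enumerate_cons, List.foldl_cons, ih]
      by_cases hx : st.1 > x
      · rw [if_pos hx]
        by_cases hbx : rminL (y :: s) < x
        · rw [if_pos hbx, rminL_cons, min_eq_right hbx.le, if_pos (hbx.trans hx)]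
          simp [rposL, not_le.mpr hbx]
          ring
        · rw [if_neg hbx, rminL_cons, min_eq_left (le_of_not_gt hbx), if_pos hx]
          simp [rposL, le_of_not_gt hbx]
      · rw [if_neg hx]
        have hxs : st.1 ≤ x := le_of_not_gt hx
        by_cases hbs : rminL (y :: s) < st.1
        · have hbx : rminL (y :: s) < x := lt_of_lt_of_le hbs hxs
          rw [if_pos hbs, rminL_cons, min_eq_right hbx.le, if_pos hbs]
          simp [rposL, not_le.mpr hbx]
          ring
        · rw [if_neg hbs, rminL_cons]
          exact (if_neg fun hc => (min_lt_iff.mp hc).elim (fun h1 => hx h1) (fun h2 => hbs h2)).symm ▸ rfl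

lemma outer_spec : ∀ (rs : List (List Int)) (r : List Int),
    (∀ r' ∈ r :: rs, r' ≠ []) → ∀ (k : Int) (st : Int × Int × Int),
    (PySem.List.enumerate (r :: rs) k).foldl
      (fun st p => (PySem.List.enumerate p.2 0).foldl
        (fun st q => if st.1 > q.2 then (q.2, p.1, q.1) else st) st) st
    = if rminL ((r :: rs).map rminL) < st.1 then
        (rminL ((r :: rs).map rminL),
         k + (rposL ((r :: rs).map rminL) : Int),
         (rposL ((r :: rs).getD (rposL ((r :: rs).map rminL)) []) : Int))
      else st := by
  intro rs
  induction rs with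
  | nil =>
      intro r hne k st
      obtain ⟨x, t, rfl⟩ := List.exists_cons_of_ne_nil (hne r (by simp))
      rw [PySem.List.enumerate_cons, PySem.List.enumerate_nil, List.foldl_cons, List.foldl_nil,
        inner_spec]
      simp [rminL, rposL]
  | cons r2 rest ih =>
      intro r hne k st
      obtain ⟨x, t, hr⟩ := List.exists_cons_of_ne_nil (hne r (by simp))
      rw [PySem.List.enumerate_cons, List.foldl_cons]
      have hinner :
          (PySem.List.enumerate r 0).foldl
            (fun st q => if st.1 > q.2 then (q.2, k, q.1) else st) st
          = if rminL r < st.1 then (rminL r, k, (0 : Int) + (rposL r : Int)) else st := by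
        rw [hr, inner_spec]
      rw [hinner, ih r2 (fun r' hr' => hne r' (by simp [hr'])) (k + 1)]
      simp only [List.map_cons]
      by_cases h1 : rminL r < st.1
      · rw [if_pos h1]
        by_cases h2 : rminL (rminL r2 :: List.map rminL rest) < rminL r
        · rw [if_pos h2, rminL_cons, min_eq_right h2.le, if_pos (h2.trans h1)]
          simp [rposL, not_le.mpr h2]
          ring
        · rw [if_neg h2, rminL_cons, min_eq_left (le_of_not_gt h2), if_pos h1]
          simp [rposL, le_of_not_gt h2]
      · rw [if_neg h1]
        have h1' : st.1 ≤ rminL r := le_of_not_gt h1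
        by_cases h2 : rminL (rminL r2 :: List.map rminL rest) < st.1
        · have h2a : rminL (rminL r2 :: List.map rminL rest) < rminL r :=
            lt_of_lt_of_le h2 h1'
          rw [if_pos h2, rminL_cons, min_eq_right h2a.le, if_pos h2]
          simp [rposL, not_le.mpr h2a]
          ring
        · rw [if_neg h2, rminL_cons,
            if_neg fun hc => (min_lt_iff.mp hc).elim (fun hq => h1 hq) (fun hq => h2 hq)]

/-- Row comprehension `[row[j] for j in range(n)]` is `row.take n` when `n ≤ len row`. -/
lemma vals_eq (r : List Int) (n : Nat) (h : n ≤ r.length) :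
    (PySem.List.pyRange 0 (n : Int) 1).map (fun j => PySem.List.pyGetD r j 0) = r.take n := by
  have hlen : (r.take n).length = n := by simp [h]
  have hcongr : ∀ j ∈ PySem.List.pyRange 0 (n : Int) 1,
      PySem.List.pyGetD r j 0 = PySem.List.pyGetD (r.take n) j 0 := by
    intro j hj
    obtain ⟨hj0, hjn⟩ := PySem.List.mem_pyRange_one.mp hj
    obtain ⟨p, rfl⟩ := Int.eq_ofNat_of_zero_le hj0
    have hp : p < n := by exact_mod_cast hjn
    rw [PySem.List.pyGetD_natCast, PySem.List.pyGetD_natCast,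
      List.getD_eq_getElem _ _ (by omega), List.getD_eq_getElem _ _ (by simp [hlen, hp]),
      List.getElem_take]
  rw [List.map_congr_left hcongr]
  have := PySem.List.map_pyGetD_pyRange_zero' (r.take n) (0 : Int)
  rw [hlen] at this
  exact this

lemma fold_vals_eq (r : List Int) (n : Nat) (h : n ≤ r.length)
    (F : (Int × Int × Int) → Int → Int → (Int × Int × Int)) (st : Int × Int × Int) :
    (PySem.List.pyRange 0 (n : Int) 1).foldl (fun st j => F st (PySem.List.pyGetD r j 0) j) st
    = (PySem.List.enumerate (r.take n) 0).foldl (fun st q => F st q.2 q.1) st := by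
  have hlen : (r.take n).length = n := by simp [h]
  rw [PySem.List.enumerate_eq_map_pyRange (r.take n) (0 : Int), List.foldl_map,
    PySem.List.len_eq, hlen]
  refine (PySem.List.foldl_congr_mem _ _ _ _ ?_)
  intro acc j hj
  obtain ⟨hj0, hjn⟩ := PySem.List.mem_pyRange_one.mp hj
  obtain ⟨p, rfl⟩ := Int.eq_ofNat_of_zero_le hj0
  have hp : p < n := by exact_mod_cast hjn
  rw [PySem.List.pyGetD_natCast, PySem.List.pyGetD_natCast,
    List.getD_eq_getElem _ _ (by omega), List.getD_eq_getElem _ _ (by simp [hlen, hp]),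
    List.getElem_take]

/-- `min` of a nonempty list through `min?`, as both B lookups compute it. -/
lemma min?_getD_rmin (l : List Int) (h : l ≠ []) :
    (PySem.List.min? l (fun x => x)).getD 0 = rminL l := by
  obtain ⟨x, t, rfl⟩ := List.exists_cons_of_ne_nil h
  rw [PySem.List.min?_id_cons]
  rfl

lemma idx_rmin' (l : List Int) (h : l ≠ []) :
    PySem.List.index? l (rminL l) = some (rposL l) := by
  obtain ⟨x, t, rfl⟩ := List.exists_cons_of_ne_nil h
  exact idx_rmin t x

lemma rposL_eq_zero (x : Int) (t : List Int) (h : x ≤ rminL (x :: t)) :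
    rposL (x :: t) = 0 := by
  cases t with
  | nil => rfl
  | cons y s =>
      rw [rminL_cons] at h
      simp [rposL, le_min_iff.mp h |>.2]

/-- The truncation of the rows A and B actually scan. -/
def ttake (M : List (List Int)) : List (List Int) := M.map (fun r => r.take M.length)

lemma ttake_length (M : List (List Int)) : (ttake M).length = M.length := by simp [ttake]

lemma ttake_getD (M : List (List Int)) (k : Nat) (hk : k < M.length) :
    (ttake M).getD k [] = (M.getD k []).take M.length := by
  rw [List.getD_eq_getElem _ _ (by simpa [ttake_length]), List.getD_eq_getElem _ _ hk]
  simp [ttake]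

lemma ttake_ne (M : List (List Int)) (hlen : ∀ r ∈ M, M.length ≤ r.length)
    (hn : 0 < M.length) : ∀ r ∈ ttake M, r ≠ [] := by
  intro r hr
  obtain ⟨r0, hr0, rfl⟩ := List.mem_map.mp hr
  have : M.length ≤ r0.length := hlen r0 hr0
  intro hc
  have h2 := congrArg List.length hc
  rw [List.length_take] at h2
  simp only [List.length_nil] at h2
  omega

lemma rowlen (M : List (List Int)) (hlen : ∀ r ∈ M, M.length ≤ r.length)
    (k : Nat) (hk : k < M.length) : M.length ≤ (M.getD k []).length := by
  rw [List.getD_eq_getElem _ _ hk]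
  exact hlen _ (List.getElem_mem _)

-- ===== VERDICT (by name: the statement is the Claim_ definition above) =====
theorem FindAndChange_spec : Claim_equal_FindAndChange := by
  intro M _hDom hPre
  obtain ⟨hne, hlen⟩ := hPre
  unfold Spec_FindAndChange
  have hn : 0 < M.length := List.length_pos_of_ne_nil hne
  have hTne := ttake_ne M hlen hn
  have hTneD : ∀ k : Nat, k < M.length → (ttake M).getD k [] ≠ [] := by
    intro k hk
    apply hTne
    rw [List.getD_eq_getElem _ _ (by rw [ttake_length]; exact hk)]
    exact List.getElem_mem _
  -- the column comprehension / inner scan over row k reaches exactly (ttake M).getD k []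
  have hvals : ∀ p : Nat, p < M.length →
      (PySem.List.pyRange 0 (M.length : Int) 1).map
        (fun j => PySem.List.pyGetD (PySem.List.pyGetD M (p : Int) []) j 0)
      = (ttake M).getD p [] := by
    intro p hp
    rw [PySem.List.pyGetD_natCast, vals_eq _ _ (rowlen M hlen p hp), ttake_getD M p hp]
  -- rowMins is the per-row minimum table of the truncated rows
  have hrowMins :
      (PySem.List.pyRange 0 (M.length : Int) 1).map
        (fun i => (PySem.List.min? ((PySem.List.pyRange 0 (M.length : Int) 1).map
            (fun j => PySem.List.pyGetD (PySem.List.pyGetD M i []) j 0)) (fun x => x)).getD 0)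
      = (ttake M).map rminL := by
    have h1 : ∀ i ∈ PySem.List.pyRange 0 (M.length : Int) 1,
        (PySem.List.min? ((PySem.List.pyRange 0 (M.length : Int) 1).map
            (fun j => PySem.List.pyGetD (PySem.List.pyGetD M i []) j 0)) (fun x => x)).getD 0
        = rminL (PySem.List.pyGetD (ttake M) i []) := by
      intro i hi
      obtain ⟨hi0, hin⟩ := PySem.List.mem_pyRange_one.mp hi
      obtain ⟨p, rfl⟩ := Int.eq_ofNat_of_zero_le hi0
      have hp : p < M.length := by exact_mod_cast hin
      rw [hvals p hp, min?_getD_rmin _ (hTneD p hp), PySem.List.pyGetD_natCast]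
    rw [List.map_congr_left h1]
    have h2 : (PySem.List.pyRange 0 (M.length : Int) 1).map
          (fun i => rminL (PySem.List.pyGetD (ttake M) i []))
        = ((PySem.List.pyRange 0 (M.length : Int) 1).map
            (fun i => PySem.List.pyGetD (ttake M) i [])).map rminL := by
      rw [List.map_map]
      rfl
    rw [h2, ← ttake_length M, PySem.List.map_pyGetD_pyRange_zero']
  have hmsne : (ttake M).map rminL ≠ [] := by
    intro hc
    have h2 := congrArg List.length hc
    rw [List.length_map, ttake_length] at h2
    simp only [List.length_nil] at h2
    omega
  have hLlt : rposL ((ttake M).map rminL) < M.length := by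
    have := rposL_lt_length _ hmsne
    simpa [ttake_length] using this
  -- the minimum of row rposL(ms) is the global minimum
  have hrowmin : rminL ((ttake M).getD (rposL ((ttake M).map rminL)) [])
      = rminL ((ttake M).map rminL) := by
    have h1 := getD_rposL _ hmsne
    rw [List.getD_eq_getElem _ _ (by rw [List.length_map, ttake_length]; exact hLlt),
      List.getElem_map] at h1
    rw [← h1, List.getD_eq_getElem _ _ (by rw [ttake_length]; exact hLlt)]
  -- ===== reduce B =====
  have hB : FindAndChange_alt M =
      PySem.List.pySetD M ((rposL ((ttake M).map rminL) : Nat) : Int)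
        (PySem.List.pySetD
          (PySem.List.pyGetD M ((rposL ((ttake M).map rminL) : Nat) : Int) [])
          ((rposL ((ttake M).getD (rposL ((ttake M).map rminL)) []) : Nat) : Int)
          (PySem.List.pyGetD
            (PySem.List.pyGetD M ((rposL ((ttake M).map rminL) : Nat) : Int) [])
            ((rposL ((ttake M).getD (rposL ((ttake M).map rminL)) []) : Nat) : Int) 0 * 10)) := by
    simp only [FindAndChange_alt, PySem.List.len_eq]
    rw [hrowMins, min?_getD_rmin _ hmsne, idx_rmin' _ hmsne]
    simp only [Option.getD_some]
    rw [hvals _ hLlt, ← hrowmin, idx_rmin' _ (hTneD _ hLlt)]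
    simp only [Option.getD_some]
  -- ===== reduce A =====
  obtain ⟨T0, Trest, hTc⟩ := List.exists_cons_of_ne_nil
    (show ttake M ≠ [] by
      intro hc
      have h2 := congrArg List.length hc
      rw [ttake_length] at h2
      simp only [List.length_nil] at h2
      omega)
  have hAfold :
      (PySem.List.pyRange 0 (M.length : Int) 1).foldl
        (fun st i => (PySem.List.pyRange 0 (M.length : Int) 1).foldl
          (fun st j =>
            if st.1 > PySem.List.pyGetD (PySem.List.pyGetD M i []) j 0 then
              (PySem.List.pyGetD (PySem.List.pyGetD M i []) j 0, i, j)
            else st) st)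
        (PySem.List.pyGetD (PySem.List.pyGetD M 0 []) 0 0, (0 : Int), (0 : Int))
      = if rminL ((ttake M).map rminL)
            < PySem.List.pyGetD (PySem.List.pyGetD M 0 []) 0 0 then
          (rminL ((ttake M).map rminL),
           (0 : Int) + (rposL ((ttake M).map rminL) : Int),
           (rposL ((ttake M).getD (rposL ((ttake M).map rminL)) []) : Int))
        else (PySem.List.pyGetD (PySem.List.pyGetD M 0 []) 0 0, (0 : Int), (0 : Int)) := by
    have hbridge :
        (PySem.List.pyRange 0 (M.length : Int) 1).foldl
          (fun st i => (PySem.List.pyRange 0 (M.length : Int) 1).foldl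
            (fun st j =>
              if st.1 > PySem.List.pyGetD (PySem.List.pyGetD M i []) j 0 then
                (PySem.List.pyGetD (PySem.List.pyGetD M i []) j 0, i, j)
              else st) st)
          (PySem.List.pyGetD (PySem.List.pyGetD M 0 []) 0 0, (0 : Int), (0 : Int))
        = (PySem.List.enumerate (ttake M) 0).foldl
            (fun st p => (PySem.List.enumerate p.2 0).foldl
              (fun st q => if st.1 > q.2 then (q.2, p.1, q.1) else st) st)
            (PySem.List.pyGetD (PySem.List.pyGetD M 0 []) 0 0, (0 : Int), (0 : Int)) := by
      rw [PySem.List.enumerate_eq_map_pyRange (ttake M) ([] : List Int), List.foldl_map,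
        PySem.List.len_eq, ttake_length]
      refine PySem.List.foldl_congr_mem _ _ _ _ ?_
      intro acc i hi
      obtain ⟨hi0, hin⟩ := PySem.List.mem_pyRange_one.mp hi
      obtain ⟨p, rfl⟩ := Int.eq_ofNat_of_zero_le hi0
      have hp : p < M.length := by exact_mod_cast hin
      rw [PySem.List.pyGetD_natCast M p,
        fold_vals_eq _ _ (rowlen M hlen p hp)
          (fun st v j => if st.1 > v then (v, (p : Int), j) else st) acc,
        PySem.List.pyGetD_natCast (ttake M) p, ttake_getD M p hp]
    rw [hbridge, hTc, outer_spec Trest T0 (hTc ▸ hTne) 0, ← hTc]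
  -- ===== assemble =====
  simp only [FindAndChange, PySem.List.len_eq, hB, hAfold]
  by_cases hcase : rminL ((ttake M).map rminL)
      < PySem.List.pyGetD (PySem.List.pyGetD M 0 []) 0 0
  · rw [if_pos hcase]
    simp
  · rw [if_neg hcase]
    -- the initial element Matrix[0][0] is already the global minimum: both pick (0, 0)
    have hx0 : (ttake M).getD 0 [] = T0 := by rw [hTc]; rfl
    obtain ⟨x0, t0, hT0⟩ := List.exists_cons_of_ne_nil (hTneD 0 hn)
    have hv00 : x0 = PySem.List.pyGetD (PySem.List.pyGetD M 0 []) 0 0 := by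
      simp only [PySem.List.pyGetD_ofNat']
      have h2 := ttake_getD M 0 hn
      rw [hT0] at h2
      have h4 : (x0 :: t0)[0]? = (M.getD 0 [])[0]? := by
        rw [h2, List.getElem?_take_of_lt hn]
      rw [List.getD_eq_getElem?_getD, ← h4]
      rfl
    have hms_head : ((ttake M).map rminL).getD 0 0 = rminL ((ttake M).getD 0 []) := by
      rw [List.getD_eq_getElem _ _ (by rw [List.length_map, ttake_length]; exact hn),
        List.getElem_map, List.getD_eq_getElem _ _ (by rw [ttake_length]; exact hn)]
    obtain ⟨m0, ms', hms⟩ := List.exists_cons_of_ne_nil hmsne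
    have hm0 : m0 = rminL ((ttake M).getD 0 []) := by
      rw [← hms_head, hms]
      rfl
    have h2 : rminL ((ttake M).map rminL) ≤ m0 := by
      rw [hms]; exact rminL_le_head m0 ms'
    have h3 : rminL ((ttake M).getD 0 []) ≤ x0 := by
      rw [hT0]
      exact rminL_le_head x0 t0
    have hge : PySem.List.pyGetD (PySem.List.pyGetD M 0 []) 0 0
        ≤ rminL ((ttake M).map rminL) := le_of_not_gt hcase
    have hL0 : rposL ((ttake M).map rminL) = 0 := by
      rw [hms]
      apply rposL_eq_zero
      rw [← hms]
      omega
    have hM0 : rposL ((ttake M).getD (rposL ((ttake M).map rminL)) []) = 0 := by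
      rw [hL0, hT0]
      apply rposL_eq_zero
      rw [← hT0]
      omega
    rw [hM0, hL0]
    simp
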